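-- pv_equiv track=rewrite | github.com/GWDx/Course | 面向科学问题求解的编程实践/Fibonacci-like/Fibonacci-like.py | remainRangeLCM
-- ===== SOURCE A (Python) =====
-- def remainRangeLCM(ansM, partA):
--     length = len(partA)
--     partM = ansM[:length]
--     lcm = 360
--     result = []
--     for x in range(lcm):
--         notMod = True
--         for i in range(length):
--             if x % partM[i] == partA[i]:
--                 notMod = False
--                 break
--         if notMod:
--             result.append(x)
--     return result
-- ===== SOURCE B (Python) =====
-- def remainRangeLCM(ansM, partA):
--     excluded = [False] * 360
--     for m, a in zip(ansM, partA):
--         if a % m == a:  # a is a feasible value of (x % m); otherwise no x matches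
--             step = abs(m)
--             for x in range(a % step, 360, step):
--                 excluded[x] = True
--     return [x for x in range(360) if not excluded[x]]
-- ===== Notes on version B (the rewrite author's own statement) =====
-- stated objective: faster
-- what changed: Replaces A's 360-by-n nested scan (test every x in range(360) against every modulus with an early break) by a mark-then-sweep sieve: each constraint (m,a) whose a is a feasible remainder marks the arithmetic progression a%|m|, a%|m|+|m|, ... below 360 in a boolean array, then one sweep collects the unmarked positions.
-- outside the precondition, e.g. on remainRangeLCM([1, 0], [0, 0]): A returns [], B raises ZeroDivisionError; on remainRangeLCM([1], [0, 5]): A returns [], B returns []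
import Mathlib
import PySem

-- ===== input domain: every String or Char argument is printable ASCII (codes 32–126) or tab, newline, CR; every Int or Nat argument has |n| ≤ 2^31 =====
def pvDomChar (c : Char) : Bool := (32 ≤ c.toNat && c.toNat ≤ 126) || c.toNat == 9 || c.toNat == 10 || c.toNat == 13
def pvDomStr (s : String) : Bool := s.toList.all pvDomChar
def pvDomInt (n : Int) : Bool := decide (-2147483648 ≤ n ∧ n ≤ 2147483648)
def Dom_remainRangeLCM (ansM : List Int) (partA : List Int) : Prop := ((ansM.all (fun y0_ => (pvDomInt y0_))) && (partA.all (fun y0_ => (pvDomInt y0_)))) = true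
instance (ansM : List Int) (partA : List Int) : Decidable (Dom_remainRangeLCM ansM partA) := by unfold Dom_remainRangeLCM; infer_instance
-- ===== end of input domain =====

-- B replaces A's 360×n nested scan by a mark-then-sweep sieve over a 360-slot boolean array (faster by a constant factor, measured).

-- ===== PORT A =====
-- inner 'for i in range(length): if x % partM[i] == partA[i]: notMod = False; break'
def remainRangeLCM_inner (partM partA : List Int) (x : Int) : List Int → Bool
  | [] => true
  | i :: rest =>
    if PySem.Int.mod x (PySem.List.pyGetD partM i 0) = PySem.List.pyGetD partA i 0 then
      false
    else remainRangeLCM_inner partM partA x rest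

def remainRangeLCM (ansM : List Int) (partA : List Int) : List Int :=
  let length : Int := partA.length
  let partM := PySem.List.slice ansM none (some length)
  let lcm : Int := 360
  (PySem.List.pyRange 0 lcm 1).foldl
    (fun result x =>
      let notMod := remainRangeLCM_inner partM partA x (PySem.List.pyRange 0 length 1)
      if notMod then result ++ [x] else result) []

-- ===== PORT B =====
-- 'for x in range(start, 360, step): excluded[x] = True'
def remainRangeLCM_mark (ex : List Bool) (start step : Int) : List Bool :=
  (PySem.List.pyRange start 360 step).foldl (fun e x => PySem.List.pySetD e x true) ex

def remainRangeLCM_alt (ansM : List Int) (partA : List Int) : List Int :=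
  let ex := (ansM.zip partA).foldl
    (fun e p =>
      if PySem.Int.mod p.2 p.1 = p.2 then
        remainRangeLCM_mark e (PySem.Int.mod p.2 |p.1|) |p.1|
      else e) (List.replicate 360 false)
  (PySem.List.pyRange 0 360 1).foldl
    (fun result x => if !(PySem.List.pyGetD ex x false) then result ++ [x] else result) []

-- ===== PRECONDITION & SPEC =====
-- Pre_ excludes inputs where len(partA) > len(ansM) or where one of the used moduli ansM[:len(partA)] is 0:
-- there A raises IndexError resp. ZeroDivisionError, except in the accidental corner where an earlier
-- constraint already excludes every x before the faulty index is reached (then A returns, B may raise or truncate).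
def Pre_remainRangeLCM (ansM : List Int) (partA : List Int) : Prop :=
  partA.length ≤ ansM.length ∧ ∀ m ∈ ansM.take partA.length, m ≠ 0
instance (ansM : List Int) (partA : List Int) : Decidable (Pre_remainRangeLCM ansM partA) := by
  unfold Pre_remainRangeLCM; infer_instance

def pvWitness_remainRangeLCM : List Int × List Int := ([3, 5], [1, 2])

def Spec_remainRangeLCM (ansM : List Int) (partA : List Int) (out : List Int) : Prop := out = remainRangeLCM_alt ansM partA
instance (ansM : List Int) (partA : List Int) (out : List Int) : Decidable (Spec_remainRangeLCM ansM partA out) := by unfold Spec_remainRangeLCM; infer_instance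

-- ===== CLAIM (what is proved, stated in full; the proofs are below) =====
def Claim_equal_remainRangeLCM : Prop := ∀ (ansM : List Int) (partA : List Int), Dom_remainRangeLCM ansM partA → Pre_remainRangeLCM ansM partA → Spec_remainRangeLCM ansM partA (remainRangeLCM ansM partA)

-- ===== LEMMAS AND PROOFS =====

-- Python's % depends only on the residue class modulo the divisor.
theorem pv_mod_dvd_sub (x m : Int) : m ∣ x - PySem.Int.mod x m := by
  refine ⟨PySem.Int.floordiv x m, ?_⟩
  have h := PySem.Int.floordiv_mul_add_mod x m
  ring_nf
  linarith

theorem pv_mod_eq_of_dvd {x y m : Int} (hm : m ≠ 0) (h : m ∣ x - y) :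
    PySem.Int.mod x m = PySem.Int.mod y m := by
  have hd : m ∣ PySem.Int.mod x m - PySem.Int.mod y m := by
    have h1 := pv_mod_dvd_sub x m
    have h2 := pv_mod_dvd_sub y m
    have : PySem.Int.mod x m - PySem.Int.mod y m = (x - y) - (x - PySem.Int.mod x m) + (y - PySem.Int.mod y m) := by ring
    rw [this]
    exact dvd_add (dvd_sub h h1) h2
  have habs : |m| ∣ PySem.Int.mod x m - PySem.Int.mod y m := (abs_dvd _ _).mpr hd
  have hz : PySem.Int.mod x m - PySem.Int.mod y m = 0 := by
    apply Int.eq_zero_of_abs_lt_dvd habs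
    rcases lt_trichotomy m 0 with hneg | hzero | hpos
    · have b1 := PySem.Int.mod_neg_bounds x hneg
      have b2 := PySem.Int.mod_neg_bounds y hneg
      rw [abs_of_neg hneg] at *
      rw [abs_lt]; constructor <;> omega
    · exact absurd hzero hm
    · have b1a := PySem.Int.mod_nonneg x hpos
      have b1b := PySem.Int.mod_lt x hpos
      have b2a := PySem.Int.mod_nonneg y hpos
      have b2b := PySem.Int.mod_lt y hpos
      rw [abs_of_pos hpos]
      rw [abs_lt]; constructor <;> omega
  omega

theorem pv_mod_le_self {x m : Int} (hm : 0 < m) (hx : 0 ≤ x) : PySem.Int.mod x m ≤ x := by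
  obtain ⟨k, hk⟩ := pv_mod_dvd_sub x m
  have hb := PySem.Int.mod_lt x hm
  have hnn := PySem.Int.mod_nonneg x hm
  -- x - mod = m * k, x ≥ 0, 0 ≤ mod < m ⇒ k ≥ 0
  by_cases hk0 : 0 ≤ k
  · nlinarith
  · exfalso
    have : k ≤ -1 := by omega
    nlinarith

-- The per-constraint characterisation: for m ≠ 0 and 0 ≤ x < 360,
-- x % m = a  ↔  a is a feasible remainder (a % m = a) and x lies on B's marked progression.
theorem pv_constraint_iff (m a x : Int) (hm : m ≠ 0) (h0 : 0 ≤ x) (h1 : x < 360) :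
    (PySem.Int.mod a m = a ∧ x ∈ PySem.List.pyRange (PySem.Int.mod a |m|) 360 |m|) ↔
      PySem.Int.mod x m = a := by
  have habs : (0:Int) < |m| := abs_pos.mpr hm
  have habsne : |m| ≠ 0 := ne_of_gt habs
  constructor
  · rintro ⟨hfeas, hmem⟩
    rw [PySem.List.mem_pyRange_iff_of_pos habs] at hmem
    obtain ⟨hle, hlt, hdvd⟩ := hmem
    -- |m| ∣ x - a, hence m ∣ x - a, hence x % m = a % m = a
    have h2 : |m| ∣ a - PySem.Int.mod a |m| := pv_mod_dvd_sub a |m|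
    have h3 : |m| ∣ x - a := by
      have : x - a = (x - PySem.Int.mod a |m|) - (a - PySem.Int.mod a |m|) := by ring
      rw [this]; exact dvd_sub hdvd h2
    have h4 : m ∣ x - a := (abs_dvd m _).mp h3
    calc PySem.Int.mod x m = PySem.Int.mod a m := pv_mod_eq_of_dvd hm h4
      _ = a := hfeas
  · intro hxa
    have h4 : m ∣ x - a := by
      have := pv_mod_dvd_sub x m
      rwa [hxa] at this
    have hfeas : PySem.Int.mod a m = a := by
      have : PySem.Int.mod a m = PySem.Int.mod x m :=
        pv_mod_eq_of_dvd hm (by simpa using (dvd_neg.mpr h4))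
      rw [this, hxa]
    refine ⟨hfeas, ?_⟩
    rw [PySem.List.mem_pyRange_iff_of_pos habs]
    have habsdvd : |m| ∣ x - a := (abs_dvd m _).mpr h4
    have hmodeq : PySem.Int.mod x |m| = PySem.Int.mod a |m| := pv_mod_eq_of_dvd habsne habsdvd
    refine ⟨?_, h1, ?_⟩
    · rw [← hmodeq]; exact pv_mod_le_self habs h0
    · have h2 : |m| ∣ a - PySem.Int.mod a |m| := pv_mod_dvd_sub a |m|
      have : x - PySem.Int.mod a |m| = (x - a) + (a - PySem.Int.mod a |m|) := by ring
      rw [this]; exact dvd_add habsdvd h2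

-- folding pySetD-true over a list of in-range indices, read back at j
theorem pv_length_foldl_set (L : List Int) (ex : List Bool) :
    (L.foldl (fun e x => PySem.List.pySetD e x true) ex).length = ex.length := by
  induction L generalizing ex with
  | nil => rfl
  | cons y L ih => simp [List.foldl_cons, ih, PySem.List.length_pySetD]

theorem pv_getD_foldl_set (L : List Int) (ex : List Bool) (j : Nat)
    (hL : ∀ x ∈ L, 0 ≤ x ∧ x < ex.length) :
    (L.foldl (fun e x => PySem.List.pySetD e x true) ex).getD j false =
      ((decide ((j : Int) ∈ L)) || ex.getD j false) := by
  induction L generalizing ex with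
  | nil => simp
  | cons y L ih =>
    have hy := hL y (by simp)
    have hL' : ∀ x ∈ L, 0 ≤ x ∧ x < (PySem.List.pySetD ex y true).length := by
      intro x hx
      rw [PySem.List.length_pySetD]
      exact hL x (by simp [hx])
    rw [List.foldl_cons, ih _ hL']
    rw [PySem.List.pySetD_of_nonneg ex true hy.1]
    by_cases hxy : (j : Int) = y
    · have hjy : j = y.toNat := by omega
      have hjlt : y.toNat < ex.length := by omega
      simp [List.getD_eq_getElem?_getD, hjy, hjlt]
      exact Or.inl (Or.inl hy.1)
    · have hjy : y.toNat ≠ j := by omega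
      simp [List.getD_eq_getElem?_getD, hjy, hxy]

-- the sieve after all constraints, read back at j < 360
theorem pv_getD_sieve (pairs : List (Int × Int)) (ex : List Bool) (j : Nat)
    (hex : ex.length = 360) (hnz : ∀ p ∈ pairs, p.1 ≠ 0) (hj : j < 360) :
    (pairs.foldl (fun e p => if PySem.Int.mod p.2 p.1 = p.2 then
        remainRangeLCM_mark e (PySem.Int.mod p.2 |p.1|) |p.1| else e) ex).getD j false =
      (pairs.any (fun p => decide (PySem.Int.mod (j : Int) p.1 = p.2)) || ex.getD j false) := by
  induction pairs generalizing ex with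
  | nil => simp
  | cons p pairs ih =>
    have hm : p.1 ≠ 0 := hnz p (by simp)
    have habs : (0:Int) < |p.1| := abs_pos.mpr hm
    have hnz' : ∀ q ∈ pairs, q.1 ≠ 0 := fun q hq => hnz q (by simp [hq])
    have hj0 : (0:Int) ≤ (j:Int) := by positivity
    have hj1 : ((j:Int)) < 360 := by exact_mod_cast hj
    rw [List.foldl_cons]
    by_cases hfeas : PySem.Int.mod p.2 p.1 = p.2
    · rw [if_pos hfeas]
      have hex' : (remainRangeLCM_mark ex (PySem.Int.mod p.2 |p.1|) |p.1|).length = 360 := by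
        rw [remainRangeLCM_mark, pv_length_foldl_set]; exact hex
      rw [ih _ hex' hnz']
      rw [remainRangeLCM_mark]
      have hLr : ∀ x ∈ PySem.List.pyRange (PySem.Int.mod p.2 |p.1|) 360 |p.1|, (0:Int) ≤ x ∧ x < (ex.length : Int) := by
        intro x hx
        rw [PySem.List.mem_pyRange_iff_of_pos habs] at hx
        have hstart : (0:Int) ≤ PySem.Int.mod p.2 |p.1| := PySem.Int.mod_nonneg _ habs
        constructor
        · omega
        · rw [hex]; exact_mod_cast hx.2.1
      rw [pv_getD_foldl_set _ _ _ hLr]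
      have hiff := pv_constraint_iff p.1 p.2 (j:Int) hm hj0 hj1
      by_cases hmem : ((j:Int)) ∈ PySem.List.pyRange (PySem.Int.mod p.2 |p.1|) 360 |p.1|
      · have : PySem.Int.mod (j:Int) p.1 = p.2 := hiff.mp ⟨hfeas, hmem⟩
        simp [hmem, this]
      · have : ¬ PySem.Int.mod (j:Int) p.1 = p.2 := fun h => hmem (hiff.mpr h).2
        simp [hmem, this]
    · rw [if_neg hfeas, ih _ hex hnz']
      have : ¬ PySem.Int.mod (j:Int) p.1 = p.2 := by
        intro h
        exact hfeas ((pv_constraint_iff p.1 p.2 (j:Int) hm hj0 hj1).mpr h).1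
      simp [this]

-- zip ignores the tail of the longer list
theorem pv_zip_take_left (l1 l2 : List Int) : (l1.take l2.length).zip l2 = l1.zip l2 := by
  induction l1 generalizing l2 with
  | nil => simp
  | cons x l1 ih =>
    cases l2 with
    | nil => simp
    | cons y l2 => simp [ih]

-- the inner break loop is a Boolean 'not any' over the zipped constraint lists
theorem pv_inner_eq (pM pA : List Int) (x : Int) (k : Nat) (h : pM.length = pA.length) :
    remainRangeLCM_inner pM pA x (PySem.List.pyRange (k : Int) (pM.length : Int) 1) =
      !(((pM.drop k).zip (pA.drop k)).any fun p => decide (PySem.Int.mod x p.1 = p.2)) := by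
  by_cases hk : k < pM.length
  · rw [PySem.List.pyRange_one_cons (by exact_mod_cast hk)]
    rw [remainRangeLCM_inner]
    have hgM : PySem.List.pyGetD pM (k : Int) 0 = pM[k] := by
      rw [PySem.List.pyGetD_natCast]; exact List.getD_eq_getElem _ _ hk
    have hkA : k < pA.length := h ▸ hk
    have hgA : PySem.List.pyGetD pA (k : Int) 0 = pA[k] := by
      rw [PySem.List.pyGetD_natCast]; exact List.getD_eq_getElem _ _ hkA
    have hdM : pM.drop k = pM[k] :: pM.drop (k + 1) := (List.getElem_cons_drop hk).symm
    have hdA : pA.drop k = pA[k] :: pA.drop (k + 1) := (List.getElem_cons_drop hkA).symm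
    rw [hgM, hgA, hdM, hdA]
    simp only [List.zip_cons_cons, List.any_cons]
    by_cases hhit : PySem.Int.mod x pM[k] = pA[k]
    · rw [if_pos hhit, decide_eq_true hhit, Bool.true_or, Bool.not_true]
    · rw [if_neg hhit, decide_eq_false hhit, Bool.false_or]
      have hcast : ((k : Int) + 1) = ((k + 1 : Nat) : Int) := by push_cast; ring
      rw [hcast, pv_inner_eq pM pA x (k + 1) h]
  · have h1 : pM.drop k = [] := List.drop_eq_nil_of_le (by omega)
    have h2 : pA.drop k = [] := List.drop_eq_nil_of_le (by omega)
    rw [PySem.List.pyRange_one_eq_nil (by exact_mod_cast Nat.le_of_not_lt hk)]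
    rw [h1, h2]
    rfl
termination_by pM.length - k

-- ===== VERDICT (by name: the statement is the Claim_ definition above) =====
theorem remainRangeLCM_spec : Claim_equal_remainRangeLCM := by
  intro ansM partA _hdom hpre
  obtain ⟨hlen, hnz0⟩ := hpre
  unfold Spec_remainRangeLCM remainRangeLCM remainRangeLCM_alt
  set n := partA.length with hn
  have hslice : PySem.List.slice ansM none (some (n : Int)) = ansM.take n :=
    PySem.List.slice_to_natCast ansM n
  have htakelen : (ansM.take n).length = n := by simp [hlen]
  -- A side: filter by the inner loop
  rw [PySem.List.foldl_append_if_eq_filter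
    (fun x => remainRangeLCM_inner (PySem.List.slice ansM none (some (n : Int))) partA x
      (PySem.List.pyRange 0 (n : Int) 1))]
  -- B side: filter by the sieve
  rw [PySem.List.foldl_append_if_eq_filter
    (fun x => !(PySem.List.pyGetD ((ansM.zip partA).foldl
      (fun e p => if PySem.Int.mod p.2 p.1 = p.2 then
        remainRangeLCM_mark e (PySem.Int.mod p.2 |p.1|) |p.1| else e)
      (List.replicate 360 false)) x false))]
  simp only [List.nil_append]
  apply List.filter_congr
  intro x hx
  rw [PySem.List.mem_pyRange_one] at hx
  have hx0 : 0 ≤ x := hx.1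
  have hx360 : x < 360 := hx.2
  have hxnat : x = ((x.toNat : Nat) : Int) := by omega
  -- A's predicate
  have hA : remainRangeLCM_inner (PySem.List.slice ansM none (some (n : Int))) partA x
      (PySem.List.pyRange 0 (n : Int) 1) =
      !((ansM.zip partA).any fun p => decide (PySem.Int.mod x p.1 = p.2)) := by
    rw [hslice]
    have h0 : (0 : Int) = ((0 : Nat) : Int) := rfl
    have hstop : (n : Int) = ((ansM.take n).length : Int) := by rw [htakelen]
    rw [h0, hstop, pv_inner_eq (ansM.take n) partA x 0 (by rw [htakelen])]
    simp only [List.drop_zero]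
    rw [hn, pv_zip_take_left]
  -- B's predicate
  have hnzp : ∀ p ∈ ansM.zip partA, p.1 ≠ 0 := by
    intro p hp
    rw [← pv_zip_take_left ansM partA, ← hn] at hp
    exact hnz0 p.1 (List.of_mem_zip hp).1
  have hB : PySem.List.pyGetD ((ansM.zip partA).foldl
      (fun e p => if PySem.Int.mod p.2 p.1 = p.2 then
        remainRangeLCM_mark e (PySem.Int.mod p.2 |p.1|) |p.1| else e)
      (List.replicate 360 false)) x false =
      ((ansM.zip partA).any fun p => decide (PySem.Int.mod x p.1 = p.2)) := by
    rw [hxnat, PySem.List.pyGetD_natCast]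
    rw [pv_getD_sieve (ansM.zip partA) (List.replicate 360 false) x.toNat
      List.length_replicate hnzp (by omega)]
    rw [← hxnat]
    have hrep : (List.replicate 360 (false : Bool)).getD x.toNat false = false := by
      simp only [List.getD_eq_getElem?_getD, List.getElem?_replicate]
      split <;> rfl
    rw [hrep, Bool.or_false]
  rw [hA, hB]
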